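-- pv_equiv track=rewrite | github.com/CausalAILab/Causal-RL | causal_rl/algo/imitation/imitate.py | construct_z_sets
-- ===== SOURCE A (Python) =====
-- from typing import Dict, List, Set, Optional, Callable, Any, Tuple, Iterable
--
-- def construct_z_sets(OX_actions: Set[str], markov_bound: Set[str], boundary_actions: Set[str], ordering: List[str]) -> Dict[str, Set[str]]:
--     Z_sets = {}
--
--     for Xi in OX_actions:
--         before_Xi = set(ordering[:ordering.index(Xi)])
--
--         if Xi not in boundary_actions:
--             Z_sets[Xi] = set()
--         else:
--             Z_sets[Xi] = (markov_bound | boundary_actions) & before_Xi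
--
--     return Z_sets
-- ===== SOURCE B (Python) =====
-- def construct_z_sets(OX_actions, markov_bound, boundary_actions, ordering):
--     # Transposed, output-sensitive construction: instead of slicing `ordering` and
--     # intersecting per action, sort the boundary actions by first occurrence
--     # (descending) and scatter each element of markov_bound | boundary_actions into
--     # exactly the Z sets it belongs to, stopping at the first action it does not precede.
--     pos = {}
--     for i, a in enumerate(ordering):
--         if a not in pos:
--             pos[a] = i
--
--     Z_sets = {}
--     border = []
--     for Xi in OX_actions:
--         Z_sets[Xi] = set()
--         if Xi in boundary_actions:
--             border.append((pos[Xi], Xi))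
--     border.sort(key=lambda e: e[0], reverse=True)
--
--     for a in (markov_bound | boundary_actions):
--         pa = pos.get(a)
--         if pa is None:
--             continue
--         for p, Xi in border:
--             if pa < p:
--                 Z_sets[Xi].add(a)
--             else:
--                 break
--     return Z_sets
-- ===== Notes on version B (the rewrite author's own statement) =====
-- stated objective: alternative
-- what changed: B transposes the construction: one pass over ordering records first-occurrence positions, the boundary actions are sorted by position descending, and each element of markov_bound|boundary_actions is scattered into the Z sets of exactly the actions it precedes, breaking at the first action it does not precede, instead of A's per-action slice of ordering and set intersection.
-- outside the precondition, e.g. on construct_z_sets({'x'}, set(), {'x'}, []): A raises ValueError, B raises KeyError; on construct_z_sets({'x'}, set(), set(), []): A raises ValueError, B returns {'x': set()}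
import Mathlib
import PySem

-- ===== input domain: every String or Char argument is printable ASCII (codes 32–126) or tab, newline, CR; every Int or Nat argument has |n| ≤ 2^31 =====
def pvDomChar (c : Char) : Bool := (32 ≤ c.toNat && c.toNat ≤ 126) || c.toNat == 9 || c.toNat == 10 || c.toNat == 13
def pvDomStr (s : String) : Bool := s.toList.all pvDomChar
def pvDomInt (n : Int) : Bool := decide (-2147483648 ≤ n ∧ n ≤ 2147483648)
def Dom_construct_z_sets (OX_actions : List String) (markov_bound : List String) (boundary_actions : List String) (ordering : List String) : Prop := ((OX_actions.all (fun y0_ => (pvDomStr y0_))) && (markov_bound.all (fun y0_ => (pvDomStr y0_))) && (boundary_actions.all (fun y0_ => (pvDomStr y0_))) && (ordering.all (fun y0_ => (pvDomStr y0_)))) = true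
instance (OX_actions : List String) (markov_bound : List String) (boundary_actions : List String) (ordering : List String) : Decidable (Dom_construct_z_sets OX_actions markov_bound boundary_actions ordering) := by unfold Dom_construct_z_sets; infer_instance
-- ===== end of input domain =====

-- B inverts A's construction: instead of slicing `ordering` and intersecting per action,
-- it sorts the boundary actions by first-occurrence position (descending) and scatters
-- each element of markov_bound|boundary_actions into the Z sets of exactly the actions
-- it precedes, breaking at the first action it does not precede.

-- ===== PORT A =====
def construct_z_sets (OX_actions : List String) (markov_bound : List String) (boundary_actions : List String) (ordering : List String) : List (String × List String) :=
  (OX_actions.foldl (fun (Z_sets : PySem.Dict String (List String)) Xi =>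
      match PySem.List.index? ordering Xi with
      | none => Z_sets  -- Python raises ValueError here; such inputs are excluded by Pre_
      | some i =>
        let before_Xi : PySem.Set String :=
          PySem.Set.ofList (PySem.List.slice ordering none (some (i : Int)))
        if !(PySem.Set.contains boundary_actions Xi) then
          Z_sets.insert Xi PySem.Set.empty
        else
          Z_sets.insert Xi
            (PySem.Set.inter (PySem.Set.union markov_bound boundary_actions) before_Xi))
    PySem.Dict.empty).items

-- ===== PORT B =====
-- Source B's inner 'for p, Xi in border: … else: break' loop
def scatterInner (a : String) (pa : Int) (border : List (Int × String)) (Z : PySem.Dict String (List String)) : PySem.Dict String (List String) :=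
  match border with
  | [] => Z
  | e :: rest =>
    if pa < e.1 then scatterInner a pa rest (Z.modify e.2 [] (fun l => PySem.Set.add l a))
    else Z

def construct_z_sets_alt (OX_actions : List String) (markov_bound : List String) (boundary_actions : List String) (ordering : List String) : List (String × List String) :=
  let pos : PySem.Dict String Int :=
    (PySem.List.enumerate ordering 0).foldl
      (fun d p => if d.contains p.2 then d else d.insert p.2 p.1) PySem.Dict.empty
  let s :=
    OX_actions.foldl (fun (s : PySem.Dict String (List String) × List (Int × String)) Xi =>
      if PySem.Set.contains boundary_actions Xi then
        match pos.get? Xi with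
        | some p => (s.1.insert Xi PySem.Set.empty, s.2 ++ [(p, Xi)])
        | none => (s.1.insert Xi PySem.Set.empty, s.2)  -- Python raises KeyError; excluded by Pre_
      else (s.1.insert Xi PySem.Set.empty, s.2))
      (PySem.Dict.empty, [])
  let border := PySem.List.sorted s.2 (fun e => e.1) true
  ((PySem.Set.union markov_bound boundary_actions).foldl (fun Z a =>
      match pos.get? a with
      | none => Z
      | some pa => scatterInner a pa border Z) s.1).items

-- ===== PRECONDITION & SPEC =====
-- First conjunct: Pre_ excludes the inputs where some element of OX_actions does not occur
-- in ordering — there A raises ValueError (list.index) and B raises KeyError.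
-- Nodup conjuncts: OX_actions and markov_bound are Python sets, so under the type
-- convention their lists hold distinct elements; a list with duplicates represents no
-- Python input (stated because the proof uses distinctness).
def Pre_construct_z_sets (OX_actions : List String) (markov_bound : List String) (boundary_actions : List String) (ordering : List String) : Prop :=
  (∀ Xi ∈ OX_actions, Xi ∈ ordering) ∧ OX_actions.Nodup ∧ markov_bound.Nodup
instance (OX_actions : List String) (markov_bound : List String) (boundary_actions : List String) (ordering : List String) : Decidable (Pre_construct_z_sets OX_actions markov_bound boundary_actions ordering) := by unfold Pre_construct_z_sets; infer_instance

def pvWitness_construct_z_sets : List String × List String × List String × List String :=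
  (["x1", "x2"], ["m"], ["x2", "b"], ["m", "x1", "b", "x2"])

def Spec_construct_z_sets (OX_actions : List String) (markov_bound : List String) (boundary_actions : List String) (ordering : List String) (out : List (String × List String)) : Prop := out = construct_z_sets_alt OX_actions markov_bound boundary_actions ordering
instance (OX_actions : List String) (markov_bound : List String) (boundary_actions : List String) (ordering : List String) (out : List (String × List String)) : Decidable (Spec_construct_z_sets OX_actions markov_bound boundary_actions ordering out) := by unfold Spec_construct_z_sets; infer_instance

-- ===== CLAIM (what is proved, stated in full; the proofs are below) =====
def Claim_equal_construct_z_sets : Prop := ∀ (OX_actions : List String) (markov_bound : List String) (boundary_actions : List String) (ordering : List String), Dom_construct_z_sets OX_actions markov_bound boundary_actions ordering → Pre_construct_z_sets OX_actions markov_bound boundary_actions ordering → Spec_construct_z_sets OX_actions markov_bound boundary_actions ordering (construct_z_sets OX_actions markov_bound boundary_actions ordering)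

-- ===== LEMMAS AND PROOFS =====

-- proof-side name for B's first-occurrence dict
def posD (ordering : List String) : PySem.Dict String Int :=
  (PySem.List.enumerate ordering 0).foldl
    (fun d p => if d.contains p.2 then d else d.insert p.2 p.1) PySem.Dict.empty

-- B's enumerate loop builds a first-occurrence dict: it answers list.index queries.
theorem pos_get?_eq (l : List String) (a : String) :
    ∀ (s : Int) (d : PySem.Dict String Int),
      (((PySem.List.enumerate l s).foldl
          (fun d p => if d.contains p.2 then d else d.insert p.2 p.1) d).get? a)
        = if d.contains a then d.get? a
          else (PySem.List.index? l a).map (fun n => s + (n : Int)) := by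
  induction l with
  | nil =>
    intro s d
    simp [PySem.List.enumerate_nil, PySem.List.index?_eq_idxOf?]
    intro h
    rw [(PySem.Dict.get?_eq_none_iff_contains d a).mpr (by simp [h])]
  | cons x l ih =>
    intro s d
    rw [PySem.List.enumerate_cons]
    simp only [List.foldl_cons]
    rw [ih]
    by_cases hax : a = x
    · subst hax
      by_cases hc : d.contains a
      · simp [hc]
      · simp only [hc, Bool.false_eq_true, if_false]
        rw [PySem.Dict.get?_insert_self]
        simp [PySem.List.index?_eq_idxOf?, List.idxOf?_cons]
    · have hne : x ≠ a := fun h => hax h.symm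
      rw [PySem.List.index?_cons_of_ne _ hne]
      by_cases hcx : d.contains x
      · simp only [hcx, if_true]
        by_cases hc : d.contains a
        · simp [hc]
        · simp only [hc, Bool.false_eq_true, if_false]
          cases PySem.List.index? l a with
          | none => rfl
          | some n => simp; ring
      · simp only [hcx, Bool.false_eq_true, if_false]
        have hca : (d.insert x s).contains a = d.contains a := by
          rw [PySem.Dict.contains_insert]
          have hbe : (a == x) = false := by simp [hax]
          simp [hbe]
        rw [hca]
        by_cases hc : d.contains a
        · simp [hc, PySem.Dict.get?_insert_of_ne d s hax]
        · simp only [hc, Bool.false_eq_true, if_false]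
          cases PySem.List.index? l a with
          | none => rfl
          | some n => simp; ring

theorem posD_get? (ordering : List String) (a : String) :
    (posD ordering).get? a = (PySem.List.index? ordering a).map (fun n => (n : Int)) := by
  rw [posD, pos_get?_eq]
  simp [PySem.Dict.contains_empty]

-- Membership in a take-prefix is "first index below the bound".
theorem mem_take_iff_idx (l : List String) (a : String) :
    ∀ n : Nat, a ∈ l.take n ↔ ∃ j, PySem.List.index? l a = some j ∧ j < n := by
  simp only [PySem.List.index?_eq_idxOf?]
  induction l with
  | nil => intro n; simp
  | cons x l ih =>
    intro n
    cases n with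
    | zero => simp
    | succ m =>
      rw [List.take_succ_cons, List.idxOf?_cons]
      by_cases hax : a = x
      · subst hax
        simp
      · have hxa : ¬ x = a := fun h => hax h.symm
        have hbe : (x == a) = false := by simp [hxa]
        simp only [hbe, Bool.false_eq_true, if_false, List.mem_cons, hax, false_or]
        rw [ih m]
        constructor
        · rintro ⟨j, hj, hlt⟩
          exact ⟨j + 1, by simp [hj], by omega⟩
        · rintro ⟨j, hj, hlt⟩
          cases h' : List.idxOf? a l with
          | none => rw [h'] at hj; simp at hj
          | some k =>
            rw [h'] at hj
            simp at hj
            exact ⟨k, rfl, by omega⟩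

-- Pointwise: "a occurs in the first n positions" = "pos.get(a, n) < n".
theorem cond_eq (ord : List String) (n : Nat) (a : String) :
    PySem.Set.contains (PySem.Set.ofList (ord.take n)) a
      = decide ((posD ord).getD a ((n : Int)) < (n : Int)) := by
  rw [Bool.eq_iff_iff]
  rw [PySem.Set.contains_iff, PySem.Set.mem_ofList, decide_eq_true_iff]
  rw [PySem.Dict.getD_eq_get?_getD, posD_get?]
  rw [mem_take_iff_idx]
  cases h : PySem.List.index? ord a with
  | none => simp
  | some j => simp

-- A's per-action value as a function of the action alone.
def valA (markov_bound boundary_actions ordering : List String) (Xi : String) : List String :=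
  match PySem.List.index? ordering Xi with
  | none => []
  | some i =>
    if PySem.Set.contains boundary_actions Xi then
      PySem.Set.inter (PySem.Set.union markov_bound boundary_actions)
        (PySem.Set.ofList (PySem.List.slice ordering none (some (i : Int))))
    else PySem.Set.empty

-- total Int-valued first-occurrence index (agrees with list.index on members)
def pIdxD (ordering : List String) (Xi : String) : Int :=
  (((PySem.List.index? ordering Xi).getD 0 : Nat) : Int)

-- a fold of key-dependent inserts: last write wins, pointwise value
theorem getD_foldl_insertV (v : String → List String) :
    ∀ (l : List String) (d : PySem.Dict String (List String)) (k : String),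
      (l.foldl (fun d x => d.insert x (v x)) d).getD k []
        = if k ∈ l then v k else d.getD k [] := by
  intro l
  induction l with
  | nil => intro d k; simp
  | cons x t ih =>
    intro d k
    simp only [List.foldl_cons, ih, PySem.Dict.getD_insert, List.mem_cons]
    by_cases hkt : k ∈ t
    · simp [hkt]
    · by_cases hkx : k = x
      · simp [hkx]
      · simp [hkt, hkx]

-- Set.update by fresh distinct elements appends them
theorem set_update_append :
    ∀ (l : List String) (acc : PySem.Set String), l.Nodup → (∀ x ∈ l, x ∉ acc) →
      PySem.Set.update acc l = acc ++ l := by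
  intro l
  induction l with
  | nil => intro acc _ _; simp [PySem.Set.update]
  | cons x t ih =>
    intro acc hnd hfresh
    have hx : x ∉ acc := hfresh x (by simp)
    have hstep : PySem.Set.add acc x = acc ++ [x] := by
      simp [PySem.Set.add, hx]
    have : PySem.Set.update acc (x :: t) = PySem.Set.update (acc ++ [x]) t := by
      simp [PySem.Set.update, hstep]
    rw [this, ih (acc ++ [x]) hnd.of_cons]
    · simp
    · intro y hy
      simp only [List.mem_append, List.mem_singleton]
      rintro (h | rfl)
      · exact hfresh y (by simp [hy]) h
      · exact (List.nodup_cons.mp hnd).1 hy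

theorem set_add_nodup (s : PySem.Set String) (x : String) (h : s.Nodup) :
    (PySem.Set.add s x).Nodup := by
  simp only [PySem.Set.add]
  split_ifs with hc
  · exact h
  · have hx : x ∉ s := fun hm => hc ((PySem.Set.contains_iff s x).mpr hm)
    exact List.Nodup.append h (List.nodup_singleton x) (by simpa using hx)

theorem set_update_nodup (l : List String) :
    ∀ (s : PySem.Set String), s.Nodup → (PySem.Set.update s l).Nodup := by
  induction l with
  | nil => intro s h; simpa [PySem.Set.update] using h
  | cons x t ih =>
    intro s h
    have : PySem.Set.update s (x :: t) = PySem.Set.update (PySem.Set.add s x) t := by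
      simp [PySem.Set.update]
    rw [this]
    exact ih _ (set_add_nodup s x h)

-- accumulating conditional Set.add over fresh distinct elements is a filter
theorem foldl_add_if_eq_filter (c : String → Bool) :
    ∀ (l : List String) (acc : List String), l.Nodup → (∀ x ∈ l, x ∉ acc) →
      l.foldl (fun s a => if c a then PySem.Set.add s a else s) acc = acc ++ l.filter c := by
  intro l
  induction l with
  | nil => intro acc _ _; simp
  | cons x t ih =>
    intro acc hnd hfresh
    have hx : x ∉ acc := hfresh x (by simp)
    simp only [List.foldl_cons]
    by_cases hcx : c x
    · rw [if_pos hcx, show PySem.Set.add acc x = acc ++ [x] by simp [PySem.Set.add, hx]]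
      rw [ih (acc ++ [x]) hnd.of_cons]
      · simp [hcx]
      · intro y hy
        simp only [List.mem_append, List.mem_singleton]
        rintro (h | rfl)
        · exact hfresh y (by simp [hy]) h
        · exact (List.nodup_cons.mp hnd).1 hy
    · rw [if_neg hcx, ih acc hnd.of_cons (fun y hy => hfresh y (by simp [hy]))]
      simp [hcx]

-- scatterInner only touches keys listed in border, and only when pa < p
theorem getD_scatterInner (a : String) (pa : Int) (k : String) :
    ∀ (b : List (Int × String)) (Z : PySem.Dict String (List String)),
      b.Pairwise (fun e f => f.1 < e.1) → (b.map Prod.snd).Nodup →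
      (scatterInner a pa b Z).getD k []
        = if b.any (fun e => e.2 == k && decide (pa < e.1))
          then PySem.Set.add (Z.getD k []) a else Z.getD k [] := by
  intro b
  induction b with
  | nil => intro Z _ _; simp [scatterInner]
  | cons e t ih =>
    intro Z hpw hnd
    rw [List.map_cons] at hnd
    obtain ⟨hknotint, hnd'⟩ := List.nodup_cons.mp hnd
    obtain ⟨hhead, hpw'⟩ := List.pairwise_cons.mp hpw
    by_cases h1 : pa < e.1
    · rw [show scatterInner a pa (e :: t) Z
          = scatterInner a pa t (Z.modify e.2 [] (fun l => PySem.Set.add l a)) by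
        simp [scatterInner, h1]]
      rw [ih _ hpw' hnd']
      rw [PySem.Dict.getD_modify]
      by_cases hk : k = e.2
      · simp [h1, hk]
      · have hke : (e.2 == k) = false := beq_eq_false_iff_ne.mpr (Ne.symm hk)
        simp only [List.any_cons, hke, Bool.false_and, Bool.false_or, if_neg hk]
    · rw [show scatterInner a pa (e :: t) Z = Z by simp [scatterInner, h1]]
      have hany : ((e :: t).any (fun f => f.2 == k && decide (pa < f.1))) = false := by
        rw [List.any_eq_false]
        intro f hf
        rcases List.mem_cons.mp hf with rfl | hft
        · simp [h1]
        · have : ¬ pa < f.1 := by have := hhead f hft; omega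
          simp [this]
      simp [hany]

theorem keys_scatterInner (a : String) (pa : Int) :
    ∀ (b : List (Int × String)) (Z : PySem.Dict String (List String)),
      (∀ e ∈ b, Z.contains e.2 = true) →
      (scatterInner a pa b Z).keys = Z.keys := by
  intro b
  induction b with
  | nil => intro Z _; rfl
  | cons e t ih =>
    intro Z h
    by_cases h1 : pa < e.1
    · rw [show scatterInner a pa (e :: t) Z
          = scatterInner a pa t (Z.modify e.2 [] (fun l => PySem.Set.add l a)) by
        simp [scatterInner, h1]]
      have hkeys : (Z.modify e.2 [] (fun l => PySem.Set.add l a)).keys = Z.keys := by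
        rw [PySem.Dict.keys_modify, PySem.Dict.keys_insert_of_contains]
        exact h e (by simp)
      rw [ih _ ?_, hkeys]
      intro f hf
      rw [PySem.Dict.contains_modify]
      simp [h f (by simp [hf])]
    · rw [show scatterInner a pa (e :: t) Z = Z by simp [scatterInner, h1]]

-- a unique border entry for k decides membership; no entry means no update
theorem any_eq_of_mem (k : String) (pa pk : Int) :
    ∀ (b : List (Int × String)), (b.map Prod.snd).Nodup → (pk, k) ∈ b →
      b.any (fun e => e.2 == k && decide (pa < e.1)) = decide (pa < pk) := by
  intro b
  induction b with
  | nil => intro _ h; simp at h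
  | cons e t ih =>
    intro hnd hmem
    rw [List.map_cons] at hnd
    obtain ⟨hknotint, hnd'⟩ := List.nodup_cons.mp hnd
    rcases List.mem_cons.mp hmem with rfl | hmt
    · have htany : t.any (fun f => f.2 == k && decide (pa < f.1)) = false := by
        rw [List.any_eq_false]
        intro f hf
        have hfk : f.2 ≠ k := by
          intro heq
          exact hknotint (List.mem_map.mpr ⟨f, hf, heq⟩)
        simp [hfk]
      simp [htany]
    · have hkin : k ∈ t.map Prod.snd := List.mem_map.mpr ⟨(pk, k), hmt, rfl⟩
      have hek : (e.2 == k) = false := beq_eq_false_iff_ne.mpr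
        (fun h => hknotint (by rw [h]; exact hkin))
      simp only [List.any_cons, hek, Bool.false_and, Bool.false_or]
      exact ih hnd' hmt

theorem any_eq_false_of_not_mem (k : String) (pa : Int)
    (b : List (Int × String)) (h : k ∉ b.map Prod.snd) :
    b.any (fun e => e.2 == k && decide (pa < e.1)) = false := by
  rw [List.any_eq_false]
  intro f hf
  have hfk : f.2 ≠ k := fun heq => h (List.mem_map.mpr ⟨f, hf, heq⟩)
  simp [hfk]

-- the outer scatter fold, read pointwise at one key
theorem getD_outer (ordering : List String) (border : List (Int × String)) (k : String)
    (hpw : border.Pairwise (fun e f => f.1 < e.1)) (hnd : (border.map Prod.snd).Nodup) :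
    ∀ (mb : List String) (Z : PySem.Dict String (List String)),
      ((mb.foldl (fun Z a =>
          match (posD ordering).get? a with
          | none => Z
          | some pa => scatterInner a pa border Z) Z).getD k [])
        = mb.foldl (fun s a =>
            match (posD ordering).get? a with
            | none => s
            | some pa => if border.any (fun e => e.2 == k && decide (pa < e.1))
                         then PySem.Set.add s a else s) (Z.getD k []) := by
  intro mb
  induction mb with
  | nil => intro Z; rfl
  | cons x t ih =>
    intro Z
    cases hx : (posD ordering).get? x with
    | none => simp only [List.foldl_cons, hx]; exact ih Z
    | some pa =>
      simp only [List.foldl_cons, hx]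
      rw [ih, getD_scatterInner x pa k border _ hpw hnd]

theorem keys_outer (ordering : List String) (border : List (Int × String)) :
    ∀ (mb : List String) (Z : PySem.Dict String (List String)),
      (∀ e ∈ border, e.2 ∈ Z.keys) →
      ((mb.foldl (fun Z a =>
          match (posD ordering).get? a with
          | none => Z
          | some pa => scatterInner a pa border Z) Z).keys) = Z.keys := by
  intro mb
  induction mb with
  | nil => intro Z _; rfl
  | cons x t ih =>
    intro Z h
    cases hx : (posD ordering).get? x with
    | none => simp only [List.foldl_cons, hx]; exact ih Z h
    | some pa =>
      simp only [List.foldl_cons, hx]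
      have hcont : ∀ e ∈ border, Z.contains e.2 = true := by
        intro e he; rw [PySem.Dict.contains_iff_mem_keys]; exact h e he
      have hk := keys_scatterInner x pa border Z hcont
      rw [ih _ ?_]
      · exact hk
      · intro e he; rw [hk]; exact h e he

-- abbreviations for the proof
def pvP (boundary_actions : List String) (Xi : String) : Bool :=
  PySem.Set.contains boundary_actions Xi

def border0 (OX_actions boundary_actions ordering : List String) : List (Int × String) :=
  (OX_actions.filter (pvP boundary_actions)).map (fun Xi => (pIdxD ordering Xi, Xi))

def borderS (OX_actions boundary_actions ordering : List String) : List (Int × String) :=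
  PySem.List.sorted (border0 OX_actions boundary_actions ordering) (fun e => e.1) true

def dict0 (OX_actions : List String) : PySem.Dict String (List String) :=
  OX_actions.foldl (fun d Xi => d.insert Xi PySem.Set.empty) PySem.Dict.empty

theorem index?_some (ordering : List String) (Xi : String) (h : Xi ∈ ordering) :
    ∃ j, PySem.List.index? ordering Xi = some j :=
  Option.isSome_iff_exists.mp ((PySem.List.index?_isSome_iff ordering Xi).mpr h)

theorem pIdxD_inj (ordering : List String) (Xi Xj : String)
    (hi : Xi ∈ ordering) (hj : Xj ∈ ordering)
    (heq : pIdxD ordering Xi = pIdxD ordering Xj) : Xi = Xj := by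
  obtain ⟨i, hsi⟩ := index?_some ordering Xi hi
  obtain ⟨j, hsj⟩ := index?_some ordering Xj hj
  have hij : i = j := by
    unfold pIdxD at heq
    rw [hsi, hsj] at heq
    simp only [Option.getD_some] at heq
    exact_mod_cast heq
  subst hij
  obtain ⟨hki, hXi_eq, -⟩ := PySem.List.getElem_of_index?_eq_some hsi
  obtain ⟨hkj, hXj_eq, -⟩ := PySem.List.getElem_of_index?_eq_some hsj
  rw [← hXi_eq, ← hXj_eq]

-- B's first (pair-state) loop splits into the dict-initialisation and the border list
theorem alt_eq (OX_actions markov_bound boundary_actions ordering : List String)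
    (hmem : ∀ Xi ∈ OX_actions, Xi ∈ ordering) :
    construct_z_sets_alt OX_actions markov_bound boundary_actions ordering
      = ((PySem.Set.union markov_bound boundary_actions).foldl (fun Z a =>
            match (posD ordering).get? a with
            | none => Z
            | some pa => scatterInner a pa (borderS OX_actions boundary_actions ordering) Z)
          (dict0 OX_actions)).items := by
  unfold construct_z_sets_alt
  dsimp only
  rw [show ((PySem.List.enumerate ordering 0).foldl
      (fun d p => if d.contains p.2 then d else d.insert p.2 p.1) PySem.Dict.empty)
      = posD ordering from rfl]
  have hpair : (fun (s : PySem.Dict String (List String) × List (Int × String)) Xi =>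
      if PySem.Set.contains boundary_actions Xi then
        match (posD ordering).get? Xi with
        | some p => (s.1.insert Xi PySem.Set.empty, s.2 ++ [(p, Xi)])
        | none => (s.1.insert Xi PySem.Set.empty, s.2)
      else (s.1.insert Xi PySem.Set.empty, s.2))
      = (fun s Xi => ((fun (d : PySem.Dict String (List String)) Xi => d.insert Xi PySem.Set.empty) s.1 Xi,
          (fun (b : List (Int × String)) Xi =>
            if PySem.Set.contains boundary_actions Xi then
              (match (posD ordering).get? Xi with
               | some p => b ++ [(p, Xi)]
               | none => b)
            else b) s.2 Xi)) := by
    funext s Xi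
    by_cases hb : PySem.Set.contains boundary_actions Xi = true
    · simp only [if_pos hb]
      cases (posD ordering).get? Xi <;> rfl
    · simp only [if_neg hb]
  rw [hpair, PySem.List.foldl_prod_mk
    (f := fun (d : PySem.Dict String (List String)) Xi => d.insert Xi PySem.Set.empty)
    (g := fun (b : List (Int × String)) Xi =>
      if PySem.Set.contains boundary_actions Xi = true then
        (match (posD ordering).get? Xi with
         | some p => b ++ [(p, Xi)]
         | none => b)
      else b)]
  have hborder : (OX_actions.foldl (fun (b : List (Int × String)) Xi =>
      if PySem.Set.contains boundary_actions Xi then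
        (match (posD ordering).get? Xi with
         | some p => b ++ [(p, Xi)]
         | none => b)
      else b) [])
      = border0 OX_actions boundary_actions ordering := by
    rw [PySem.List.foldl_congr_mem _ _
        (fun (b : List (Int × String)) Xi =>
          if pvP boundary_actions Xi = true then b ++ [(pIdxD ordering Xi, Xi)] else b) _ ?_]
    · rw [PySem.List.foldl_append_if]
      simp [border0]
    · intro acc Xi hXi
      obtain ⟨j, hj⟩ := index?_some ordering Xi (hmem Xi hXi)
      have hget : (posD ordering).get? Xi = some ((j : Int)) := by
        rw [posD_get?, hj]; rfl
      have hpi : pIdxD ordering Xi = (j : Int) := by unfold pIdxD; rw [hj]; rfl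
      dsimp only
      rw [hget, hpi]
      rfl
  rw [hborder]
  rfl

-- main equivalence
theorem ports_agree (OX_actions markov_bound boundary_actions ordering : List String)
    (hmem : ∀ Xi ∈ OX_actions, Xi ∈ ordering)
    (hOXnd : OX_actions.Nodup) (hmknd : markov_bound.Nodup) :
    construct_z_sets OX_actions markov_bound boundary_actions ordering
      = construct_z_sets_alt OX_actions markov_bound boundary_actions ordering := by
  -- names
  set mb := PySem.Set.union markov_bound boundary_actions with hmb
  set bS := borderS OX_actions boundary_actions ordering with hbS
  -- A as a fold of per-key inserts
  have hA : construct_z_sets OX_actions markov_bound boundary_actions ordering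
      = (OX_actions.foldl (fun Z Xi =>
          Z.insert Xi (valA markov_bound boundary_actions ordering Xi)) PySem.Dict.empty).items := by
    unfold construct_z_sets
    congr 1
    apply PySem.List.foldl_congr_mem
    intro acc Xi hXi
    obtain ⟨j, hj⟩ := index?_some ordering Xi (hmem Xi hXi)
    have hj' : List.idxOf? Xi ordering = some j := by
      rw [← PySem.List.index?_eq_idxOf?]; exact hj
    simp [valA, PySem.List.index?_eq_idxOf?, hj']
    split_ifs <;> rfl
  rw [hA, alt_eq OX_actions markov_bound boundary_actions ordering hmem]
  -- border facts
  have hsnd0 : (border0 OX_actions boundary_actions ordering).map Prod.snd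
      = OX_actions.filter (pvP boundary_actions) := by
    simp [border0, List.map_map, Function.comp_def]
  have hperm : bS.Perm (border0 OX_actions boundary_actions ordering) :=
    PySem.List.sorted_perm _ _ _
  have hsndS : (bS.map Prod.snd).Nodup := by
    rw [(hperm.map Prod.snd).nodup_iff, hsnd0]
    exact hOXnd.filter _
  have hfstS : (bS.map Prod.fst).Nodup := by
    rw [(hperm.map Prod.fst).nodup_iff]
    rw [show (border0 OX_actions boundary_actions ordering).map Prod.fst
        = (OX_actions.filter (pvP boundary_actions)).map (pIdxD ordering) by
      simp [border0, List.map_map, Function.comp_def]]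
    refine List.Nodup.map_on ?_ (hOXnd.filter _)
    intro Xi hXi Xj hXj heq
    exact pIdxD_inj ordering Xi Xj (hmem Xi (List.mem_of_mem_filter hXi))
      (hmem Xj (List.mem_of_mem_filter hXj)) heq
  have hpwS : bS.Pairwise (fun e f => f.1 < e.1) := by
    have h1 : bS.Pairwise (fun a b => b.1 ≤ a.1) :=
      PySem.List.sorted_pairwise_rev _ _
    have h2 : bS.Pairwise (fun a b => a.1 ≠ b.1) := by
      rw [List.Nodup, List.pairwise_map] at hfstS
      exact hfstS
    exact (h1.and h2).imp (fun h => lt_of_le_of_ne h.1 (Ne.symm h.2))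
  -- keys of both dicts are OX_actions
  have hupd : PySem.Set.update ([] : PySem.Set String) OX_actions = OX_actions := by
    rw [set_update_append OX_actions [] hOXnd (by simp)]
    simp
  have hkeysA : (OX_actions.foldl (fun Z Xi =>
      Z.insert Xi (valA markov_bound boundary_actions ordering Xi)) PySem.Dict.empty).keys
      = OX_actions := by
    rw [PySem.Dict.keys_foldl_insert OX_actions
      (fun _ Xi => valA markov_bound boundary_actions ordering Xi) PySem.Dict.empty]
    simpa using hupd
  have hkeys0 : (dict0 OX_actions).keys = OX_actions := by
    rw [dict0, PySem.Dict.keys_foldl_insert OX_actions (fun _ _ => PySem.Set.empty) PySem.Dict.empty]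
    simpa using hupd
  have hgetD0 : ∀ k, (dict0 OX_actions).getD k [] = [] := by
    intro k
    rw [dict0, getD_foldl_insertV (fun _ => PySem.Set.empty)]
    split_ifs <;> simp [PySem.Set.empty]
  have hkeysF : ((mb.foldl (fun Z a =>
      match (posD ordering).get? a with
      | none => Z
      | some pa => scatterInner a pa bS Z) (dict0 OX_actions)).keys) = OX_actions := by
    rw [keys_outer ordering bS mb (dict0 OX_actions) ?_, hkeys0]
    intro e he
    rw [hkeys0]
    have : e.2 ∈ bS.map Prod.snd := List.mem_map.mpr ⟨e, he, rfl⟩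
    rw [(hperm.map Prod.snd).mem_iff, hsnd0] at this
    exact List.mem_of_mem_filter this
  -- mb has no duplicates
  have hmbnd : mb.Nodup := by
    rw [hmb, show PySem.Set.union markov_bound boundary_actions
      = PySem.Set.update markov_bound boundary_actions from rfl]
    exact set_update_nodup boundary_actions markov_bound hmknd
  -- items of both sides, pointwise over OX_actions
  rw [PySem.Dict.items_eq_map_keys _ (by rw [hkeysA]; exact hOXnd) [], hkeysA]
  rw [PySem.Dict.items_eq_map_keys _ (by rw [hkeysF]; exact hOXnd) [], hkeysF]
  apply List.map_congr_left
  intro k hk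
  obtain ⟨i, hi⟩ := index?_some ordering k (hmem k hk)
  have hvA : (OX_actions.foldl (fun Z Xi =>
      Z.insert Xi (valA markov_bound boundary_actions ordering Xi)) PySem.Dict.empty).getD k []
      = valA markov_bound boundary_actions ordering k := by
    rw [getD_foldl_insertV (valA markov_bound boundary_actions ordering)]
    rw [if_pos hk]
  rw [hvA, getD_outer ordering bS k hpwS hsndS mb (dict0 OX_actions), hgetD0 k]
  by_cases hb : PySem.Set.contains boundary_actions k = true
  · -- boundary action: B scatters exactly the mb-elements occurring before k
    have hmem0 : (pIdxD ordering k, k) ∈ border0 OX_actions boundary_actions ordering :=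
      List.mem_map.mpr ⟨k, List.mem_filter.mpr ⟨hk, hb⟩, rfl⟩
    have hmemS : (pIdxD ordering k, k) ∈ bS := hperm.mem_iff.mpr hmem0
    have hpik : pIdxD ordering k = (i : Int) := by unfold pIdxD; rw [hi]; rfl
    have hfold : mb.foldl (fun s a =>
        match (posD ordering).get? a with
        | none => s
        | some pa => if bS.any (fun e => e.2 == k && decide (pa < e.1))
                     then PySem.Set.add s a else s) []
        = mb.foldl (fun s a =>
            if decide ((posD ordering).getD a ((i : Nat) : Int) < ((i : Nat) : Int))
            then PySem.Set.add s a else s) [] := by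
      apply PySem.List.foldl_congr_mem
      intro acc a _
      cases hga : (posD ordering).get? a with
      | none =>
        dsimp only
        rw [PySem.Dict.getD_eq_get?_getD, hga]
        simp
      | some pa =>
        dsimp only
        rw [any_eq_of_mem k pa (pIdxD ordering k) bS hsndS hmemS,
          PySem.Dict.getD_eq_get?_getD, hga, hpik]
        rfl
    rw [hfold, foldl_add_if_eq_filter _ mb [] hmbnd (by simp)]
    rw [valA, hi]
    dsimp only
    rw [if_pos hb]
    rw [show PySem.Set.inter mb
        (PySem.Set.ofList (PySem.List.slice ordering none (some ((i : Nat) : Int))))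
      = mb.filter (fun a => PySem.Set.contains
          (PySem.Set.ofList (PySem.List.slice ordering none (some ((i : Nat) : Int)))) a) from rfl]
    rw [PySem.List.slice_to_natCast]
    rw [List.nil_append]
    exact congrArg (fun v => (k, v)) (List.filter_congr (fun a _ => cond_eq ordering i a))
  · -- non-boundary action: empty Z set on both sides
    have hnotin : k ∉ bS.map Prod.snd := by
      rw [(hperm.map Prod.snd).mem_iff, hsnd0]
      intro hkin
      exact hb (List.mem_filter.mp hkin).2
    have hfold : mb.foldl (fun s a =>
        match (posD ordering).get? a with
        | none => s
        | some pa => if bS.any (fun e => e.2 == k && decide (pa < e.1))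
                     then PySem.Set.add s a else s) ([] : List String)
        = mb.foldl (fun s _ => s) [] := by
      apply PySem.List.foldl_congr_mem
      intro acc a _
      cases (posD ordering).get? a with
      | none => rfl
      | some pa =>
        dsimp only
        rw [any_eq_false_of_not_mem k pa bS hnotin]
        rfl
    rw [hfold, PySem.List.foldl_ignore]
    rw [valA, hi]
    dsimp only
    rw [if_neg hb]
    rfl

-- ===== VERDICT (by name: the statement is the Claim_ definition above) =====
theorem construct_z_sets_spec : Claim_equal_construct_z_sets := by
  intro OX_actions markov_bound boundary_actions ordering _ hpre
  unfold Spec_construct_z_sets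
  exact ports_agree OX_actions markov_bound boundary_actions ordering hpre.1 hpre.2.1 hpre.2.2
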